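-- pv_equiv track=rewrite | github.com/wrocket/scratch-math | main.py | create_markdown
-- ===== SOURCE A (Python) =====
-- def create_markdown(tex_lines: list[str]) -> str:
--     # Strip leading empty lines
--     start_index = 0
--     while start_index < len(tex_lines) and not tex_lines[start_index].strip():
--         start_index += 1
--
--     # Strip trailing empty lines
--     end_index = len(tex_lines) - 1
--     while end_index >= start_index and not tex_lines[end_index].strip():
--         end_index -= 1
--
--     # If all lines are empty or tex_lines was empty initially, return an empty list for processing
--     if start_index > end_index:
--         processed_tex_lines = []
--     else:
--         processed_tex_lines = tex_lines[start_index : end_index + 1]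
--
--     result = ["$$"]
--     result.extend(processed_tex_lines)
--     result.extend(["$$", "```"])
--     result.extend(processed_tex_lines)
--     result.append("```")
--     return "\n".join(result)
-- ===== SOURCE B (Python) =====
-- def create_markdown(tex_lines: list[str]) -> str:
--     # Single forward streaming pass: a non-blank line flushes any buffered
--     # interior blank lines and is emitted; blank lines are buffered only once
--     # something non-blank has been emitted, so leading blanks are dropped and
--     # trailing blanks die in the buffer. No indices, no boundary search, no slicing.
--     processed = []
--     pending = []
--     for line in tex_lines:
--         if line.strip():
--             processed.extend(pending)
--             processed.append(line)
--             pending = []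
--         elif processed:
--             pending.append(line)
--     result = ["$$", *processed, "$$", "```", *processed, "```"]
--     return "\n".join(result)
-- ===== Notes on version B (the rewrite author's own statement) =====
-- stated objective: alternative
-- what changed: Replaces A's two boundary while-loops plus slice with a single forward streaming pass over the lines: non-blank lines flush a pending-blank buffer and are appended, blanks are buffered only after the first emitted line, so leading/trailing blanks never appear and no index search or slicing happens.
import Mathlib
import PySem

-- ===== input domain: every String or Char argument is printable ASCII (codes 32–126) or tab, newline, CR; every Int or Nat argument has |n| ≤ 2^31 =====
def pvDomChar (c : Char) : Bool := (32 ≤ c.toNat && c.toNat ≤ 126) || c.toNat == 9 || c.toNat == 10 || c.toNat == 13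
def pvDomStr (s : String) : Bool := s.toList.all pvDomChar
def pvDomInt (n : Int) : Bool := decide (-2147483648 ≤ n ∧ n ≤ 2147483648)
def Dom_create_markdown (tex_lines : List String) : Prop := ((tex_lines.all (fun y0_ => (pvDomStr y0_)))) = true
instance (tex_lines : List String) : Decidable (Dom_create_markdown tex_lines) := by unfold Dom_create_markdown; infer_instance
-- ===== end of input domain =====

-- B replaces A's two boundary while-loops + slice with one forward streaming pass
-- (non-blank lines flush a pending-blank buffer; blanks buffer only after output starts);
-- objective: alternative decomposition, same O(n) cost.

-- ===== PORT A =====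
-- 'while start_index < len(tex_lines) and not tex_lines[start_index].strip(): start_index += 1'
def pvAStart (tex_lines : List String) (i : Nat) : Nat :=
  if h : i < tex_lines.length then
    if PySem.Str.strip tex_lines[i] == "" then pvAStart tex_lines (i + 1) else i
  else i
termination_by tex_lines.length - i

-- 'while end_index >= start_index and not tex_lines[end_index].strip(): end_index -= 1'
-- (inside the loop 0 ≤ s ≤ e < len, so tex_lines[e] is in range; pyGetD is exact there)
def pvAEnd (tex_lines : List String) (s : Nat) (e : Int) : Int :=
  if h : (s : Int) ≤ e then
    if PySem.Str.strip (PySem.List.pyGetD tex_lines e "") == "" then pvAEnd tex_lines s (e - 1) else e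
  else e
termination_by (e + 1 - (s : Int)).toNat
decreasing_by omega

def create_markdown (tex_lines : List String) : String :=
  let start_index := pvAStart tex_lines 0
  let end_index := pvAEnd tex_lines start_index ((tex_lines.length : Int) - 1)
  let processed_tex_lines : List String :=
    if (start_index : Int) > end_index then []
    else PySem.List.slice tex_lines (some (start_index : Int)) (some (end_index + 1))
  PySem.Str.join "\n" (["$$"] ++ processed_tex_lines ++ ["$$", "```"] ++ processed_tex_lines ++ ["```"])

-- ===== PORT B =====
-- one step of Source B's for-loop over (processed, pending)
def pvBStep (st : List String × List String) (line : String) : List String × List String :=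
  if (PySem.Str.strip line == "") = false then (st.1 ++ st.2 ++ [line], [])
  else if st.1.isEmpty = false then (st.1, st.2 ++ [line])
  else st

def create_markdown_alt (tex_lines : List String) : String :=
  let st := tex_lines.foldl pvBStep ([], [])
  PySem.Str.join "\n" (["$$"] ++ st.1 ++ ["$$", "```"] ++ st.1 ++ ["```"])

-- ===== PRECONDITION & SPEC =====
def Spec_create_markdown (tex_lines : List String) (out : String) : Prop := out = create_markdown_alt tex_lines
instance (tex_lines : List String) (out : String) : Decidable (Spec_create_markdown tex_lines out) := by unfold Spec_create_markdown; infer_instance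

-- ===== CLAIM (what is proved, stated in full; the proofs are below) =====
def Claim_equal_create_markdown : Prop := ∀ (tex_lines : List String), Dom_create_markdown tex_lines → Spec_create_markdown tex_lines (create_markdown tex_lines)

-- ===== LEMMAS AND PROOFS =====

-- 'line is blank' in Python terms
def pvBlank (l : String) : Bool := PySem.Str.strip l == ""

-- drop trailing blank lines (proof-side normal form both ports are reduced to)
def pvTrimR : List String → List String
  | [] => []
  | a :: xs => if pvBlank a && (pvTrimR xs).isEmpty then [] else a :: pvTrimR xs

theorem pvTrimR_append_blank (v : List String) (b : String) (hb : pvBlank b = true) :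
    pvTrimR (v ++ [b]) = pvTrimR v := by
  induction v with
  | nil => simp [pvTrimR, hb]
  | cons a v ih => simp [pvTrimR, ih]

theorem pvTrimR_append_nonblank (v : List String) (a : String) (ha : pvBlank a = false) :
    pvTrimR (v ++ [a]) = v ++ [a] := by
  induction v with
  | nil => simp [pvTrimR, ha]
  | cons c v ih => simp [pvTrimR, ih]

theorem pvTrimR_prefix (l : List String) : pvTrimR l <+: l := by
  induction l with
  | nil => simp [pvTrimR]
  | cons a xs ih =>
    by_cases h : (pvBlank a && (pvTrimR xs).isEmpty) = true
    · simp [pvTrimR, h]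
    · simp only [pvTrimR, if_neg h]
      exact List.cons_prefix_cons.mpr ⟨rfl, ih⟩

-- ===== B-side characterisation =====
theorem pvB_fold_nonempty (xs : List String) :
    ∀ p q : List String, p ≠ [] →
    (xs.foldl pvBStep (p, q)).1
      = p ++ (if pvTrimR xs = [] then [] else q ++ pvTrimR xs) := by
  induction xs with
  | nil => intro p q _; simp [pvTrimR]
  | cons a xs ih =>
    intro p q hp
    rcases hb : pvBlank a with _ | _
    · -- a non-blank
      have hstep : pvBStep (p, q) a = (p ++ q ++ [a], []) := by
        simp [pvBStep, pvBlank] at hb ⊢; simp [hb]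
      rw [List.foldl_cons, hstep, ih (p ++ q ++ [a]) [] (by simp)]
      have htr : pvTrimR (a :: xs) = a :: pvTrimR xs := by simp [pvTrimR, hb]
      rw [htr]
      by_cases h : pvTrimR xs = [] <;> simp [h]
    · -- a blank, p ≠ [] so it is buffered
      have hstep : pvBStep (p, q) a = (p, q ++ [a]) := by
        simp [pvBStep, pvBlank] at hb ⊢; simp [hb, hp]
      rw [List.foldl_cons, hstep, ih p (q ++ [a]) hp]
      have htr : pvTrimR (a :: xs) = if pvTrimR xs = [] then [] else a :: pvTrimR xs := by
        by_cases h : pvTrimR xs = [] <;> simp [pvTrimR, hb, h, List.isEmpty_iff]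
      rw [htr]
      by_cases h : pvTrimR xs = [] <;> simp [h]
  -- (branch order as in Source B)

theorem pvB_fold_main (xs : List String) :
    (xs.foldl pvBStep ([], [])).1 = pvTrimR (xs.dropWhile pvBlank) := by
  induction xs with
  | nil => simp [pvTrimR]
  | cons a xs ih =>
    rcases hb : pvBlank a with _ | _
    · -- a non-blank: starts the output
      have hstep : pvBStep (([] : List String), ([] : List String)) a = ([a], []) := by
        simp [pvBStep, pvBlank] at hb ⊢; simp [hb]
      rw [List.foldl_cons, hstep, pvB_fold_nonempty xs [a] [] (by simp)]
      have hdw : (a :: xs).dropWhile pvBlank = a :: xs := by simp [hb]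
      rw [hdw]
      have htr : pvTrimR (a :: xs) = a :: pvTrimR xs := by simp [pvTrimR, hb]
      rw [htr]
      by_cases h : pvTrimR xs = [] <;> simp [h]
    · -- a blank: skipped while output is empty
      have hstep : pvBStep (([] : List String), ([] : List String)) a = ([], []) := by
        simp [pvBStep, pvBlank] at hb ⊢; simp [hb]
      rw [List.foldl_cons, hstep, ih]
      have hdw : (a :: xs).dropWhile pvBlank = xs.dropWhile pvBlank := by simp [hb]
      rw [hdw]

-- ===== A-side characterisation =====
theorem pvAStart_char (xs : List String) :
    ∀ d i, xs.length - i = d → i ≤ xs.length →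
    pvAStart xs i = xs.length - ((xs.drop i).dropWhile pvBlank).length := by
  intro d
  induction d with
  | zero =>
    intro i hd hi
    have : i = xs.length := by omega
    subst this
    unfold pvAStart
    simp
  | succ d ih =>
    intro i hd hi
    have hil : i < xs.length := by omega
    have hdrop : xs.drop i = xs[i] :: xs.drop (i + 1) := List.drop_eq_getElem_cons hil
    unfold pvAStart
    rw [dif_pos hil]
    rcases hb : pvBlank xs[i] with _ | _
    · -- non-blank: loop stops
      have hb' : (PySem.Str.strip xs[i] == "") = false := hb
      rw [hb', if_neg (by simp)]
      have hlen : ((xs.drop i).dropWhile pvBlank).length = xs.length - i := by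
        rw [hdrop, List.dropWhile_cons, if_neg (by simp [hb])]
        simp [List.length_drop]
      omega
    · have hb' : (PySem.Str.strip xs[i] == "") = true := hb
      rw [hb', if_pos rfl]
      rw [ih (i + 1) (by omega) (by omega)]
      congr 1
      rw [hdrop, List.dropWhile_cons, if_pos (by simp [hb])]

theorem pvAEnd_char (xs : List String) (s : Nat) :
    ∀ n : Nat, s ≤ n → n ≤ xs.length →
    pvAEnd xs s ((n : Int) - 1)
      = (s : Int) + ((pvTrimR ((xs.take n).drop s)).length : Int) - 1 := by
  intro n
  induction n with
  | zero =>
    intro hs hn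
    have hs0 : s = 0 := by omega
    subst hs0
    unfold pvAEnd
    rw [dif_neg (by omega)]
    simp [pvTrimR]
  | succ n ih =>
    intro hs hn
    have hnl : n < xs.length := by omega
    by_cases hsn : s = n + 1
    · -- e = s - 1 < s: loop body never runs
      unfold pvAEnd
      rw [dif_neg (by omega)]
      have hnil : (xs.take (n + 1)).drop s = [] :=
        List.drop_eq_nil_of_le (by simp [List.length_take]; omega)
      rw [hnil]
      simp [pvTrimR]
      omega
    · have hsn' : s ≤ n := by omega
      have hwin : (xs.take (n + 1)).drop s = ((xs.take n).drop s) ++ [xs[n]] := by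
        rw [List.take_add_one, List.getElem?_eq_getElem hnl]
        simp only [Option.toList_some]
        rw [List.drop_append_of_le_length (by simp [List.length_take]; omega)]
      have he : ((n + 1 : Nat) : Int) - 1 = ((n : Nat) : Int) := by push_cast; ring
      rw [he]
      unfold pvAEnd
      rw [dif_pos (by omega)]
      have hget : PySem.List.pyGetD xs ((n : Nat) : Int) "" = xs[n] := by
        rw [PySem.List.pyGetD_natCast, List.getD_eq_getElem xs "" hnl]
      rw [hget]
      rcases hb : pvBlank xs[n] with _ | _
      · -- non-blank: stop at n
        have hb' : (PySem.Str.strip xs[n] == "") = false := hb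
        rw [hb', if_neg (by simp)]
        rw [hwin, pvTrimR_append_nonblank _ _ hb]
        have hlen : (((xs.take n).drop s) ++ [xs[n]]).length = n - s + 1 := by
          simp [List.length_take]
          omega
        rw [hlen]
        omega
      · have hb' : (PySem.Str.strip xs[n] == "") = true := hb
        rw [hb', if_pos rfl, ih hsn' (by omega), hwin, pvTrimR_append_blank _ _ hb]

-- drop s recovers the dropWhile suffix
theorem pvDropTakeWhile (xs : List String) :
    xs.drop ((xs.takeWhile pvBlank).length) = xs.dropWhile pvBlank := by
  induction xs with
  | nil => rfl
  | cons a l ih =>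
    rcases hb : pvBlank a with _ | _
    · simp [hb]
    · simp [hb, ih]

theorem pvDrop_start (xs : List String) :
    xs.drop (xs.length - (xs.dropWhile pvBlank).length) = xs.dropWhile pvBlank := by
  have h1 : (xs.takeWhile pvBlank).length + (xs.dropWhile pvBlank).length = xs.length := by
    rw [← List.length_append, List.takeWhile_append_dropWhile]
  have h2 : xs.length - (xs.dropWhile pvBlank).length = (xs.takeWhile pvBlank).length := by omega
  rw [h2, pvDropTakeWhile]

-- the two ports agree on every input.
theorem pv_main (xs : List String) : create_markdown xs = create_markdown_alt xs := by
  simp only [create_markdown, create_markdown_alt]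
  have hdl : (xs.dropWhile pvBlank).length ≤ xs.length := List.length_dropWhile_le _ _
  set ds := xs.dropWhile pvBlank with hds
  set s := xs.length - ds.length with hsdef
  have hstart : pvAStart xs 0 = s := by
    rw [pvAStart_char xs xs.length 0 (by omega) (by omega)]
    simp only [List.drop_zero]
    rw [hsdef, hds]
  have hdropds : xs.drop s = ds := pvDrop_start xs
  have hend : pvAEnd xs s ((xs.length : Int) - 1)
      = (s : Int) + ((pvTrimR ds).length : Int) - 1 := by
    rw [pvAEnd_char xs s xs.length (by omega) (le_refl _)]
    rw [List.take_length, hdropds]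
  rw [hstart, hend, pvB_fold_main xs, ← hds]
  by_cases ht : pvTrimR ds = []
  · rw [ht, if_pos (by simp)]
  · have htl : 0 < (pvTrimR ds).length := List.length_pos_iff.mpr ht
    rw [if_neg (by omega)]
    have harith : (s : Int) + ((pvTrimR ds).length : Int) - 1 + 1
        = (s : Int) + (((pvTrimR ds).length : Nat) : Int) := by ring
    rw [harith, PySem.List.slice_natCast_add]
    have hpre : ds.take (pvTrimR ds).length = pvTrimR ds := by
      exact ((List.prefix_iff_eq_take.mp (pvTrimR_prefix ds))).symm
    rw [hdropds, hpre]

-- ===== VERDICT (by name: the statement is the Claim_ definition above) =====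
theorem create_markdown_spec : Claim_equal_create_markdown := by
  intro xs _
  unfold Spec_create_markdown
  exact pv_main xs
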